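-- pv_equiv track=rewrite | github.com/114August514/computer_science | lab/Lab4/ans/test.py | calculate_recommendations2
-- ===== SOURCE A (Python) =====
-- def calculate_recommendations2(N: int=0, M: int=0):
--     steps = N + M
--
--     dp = [[0] * (M + 1) for _ in range(N + 1)]
--     for i in range(N + 1):
--         for j in range(M + 1):
--             if (i * j == 0):
--                 dp[i][j] = 1
--             else:
--                 dp[i][j] = dp[i - 1][j] + dp[i][j - 1]
--     return dp[N][M] * 5 - steps
-- ===== SOURCE B (Python) =====
-- def calculate_recommendations2(N: int = 0, M: int = 0):
--     # C(N+M, min(N,M)) via the multiplicative formula, instead of the O(N*M) DP table.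
--     n = N + M
--     k = min(N, M)
--     res = 1
--     for i in range(1, k + 1):
--         res = res * (n - k + i) // i
--     return res * 5 - n
-- ===== Notes on version B (the rewrite author's own statement) =====
-- stated objective: faster
-- what changed: Replaces the (N+1)x(M+1) Pascal DP table with the multiplicative formula for the binomial coefficient C(N+M,min(N,M)), a single loop of min(N,M) exact multiply-divide steps.
import Mathlib
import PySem

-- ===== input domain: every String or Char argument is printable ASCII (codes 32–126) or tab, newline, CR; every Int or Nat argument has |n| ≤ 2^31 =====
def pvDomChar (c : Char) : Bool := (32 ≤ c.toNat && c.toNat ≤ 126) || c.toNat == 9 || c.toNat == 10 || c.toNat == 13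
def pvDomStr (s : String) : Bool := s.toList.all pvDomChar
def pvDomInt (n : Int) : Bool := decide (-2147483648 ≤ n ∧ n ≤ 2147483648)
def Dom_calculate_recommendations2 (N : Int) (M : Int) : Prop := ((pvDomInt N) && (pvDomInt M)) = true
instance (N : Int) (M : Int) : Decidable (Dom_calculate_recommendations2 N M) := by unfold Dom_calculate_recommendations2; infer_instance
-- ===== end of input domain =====

-- B replaces A's O(N*M) Pascal DP table with the multiplicative formula for C(N+M,min(N,M)): one loop of min(N,M) exact multiply-divide steps.

-- ===== PORT A =====
-- inner loop 'for j in range(M+1)' filling row i (dp[i][j-1] is the element just appended; dp[i-1][j] is 'prev')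
def pvRowA (i : Int) (prev : List Int) (M : Int) : List Int :=
  (PySem.List.pyRange 0 (M + 1) 1).foldl
    (fun row j =>
      row ++ [if i * j == 0 then (1 : Int)
              else PySem.List.pyGetD prev j 0 + PySem.List.pyGetD row (j - 1) 0]) []

def calculate_recommendations2 (N : Int) (M : Int) : Int :=
  PySem.List.pyGetD
    (PySem.List.pyGetD
      ((PySem.List.pyRange 0 (N + 1) 1).foldl
        (fun dp i => dp ++ [pvRowA i (PySem.List.pyGetD dp (i - 1) []) M]) [])
      N [])
    M 0 * 5 - (N + M)

-- ===== PORT B =====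
def calculate_recommendations2_alt (N : Int) (M : Int) : Int :=
  ((PySem.List.pyRange 1 (min N M + 1) 1).foldl
      (fun res i => PySem.Int.floordiv (res * (N + M - min N M + i)) i) 1) * 5 - (N + M)

-- ===== PRECONDITION & SPEC =====
-- A raises IndexError when N < 0 or M < 0 (dp[N] / dp[N][M] on an empty table); those inputs are excluded.
def Pre_calculate_recommendations2 (N : Int) (M : Int) : Prop := 0 ≤ N ∧ 0 ≤ M
instance (N : Int) (M : Int) : Decidable (Pre_calculate_recommendations2 N M) := by
  unfold Pre_calculate_recommendations2; infer_instance

def pvWitness_calculate_recommendations2 : Int × Int := (2, 3)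

def Spec_calculate_recommendations2 (N : Int) (M : Int) (out : Int) : Prop := out = calculate_recommendations2_alt N M
instance (N : Int) (M : Int) (out : Int) : Decidable (Spec_calculate_recommendations2 N M out) := by unfold Spec_calculate_recommendations2; infer_instance

-- ===== CLAIM (what is proved, stated in full; the proofs are below) =====
def Claim_equal_calculate_recommendations2 : Prop := ∀ (N : Int) (M : Int), Dom_calculate_recommendations2 N M → Pre_calculate_recommendations2 N M → Spec_calculate_recommendations2 N M (calculate_recommendations2 N M)

-- ===== LEMMAS AND PROOFS =====

-- the Pascal-table entry: dp[i][j] = C(i+j, j)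
def pvG (i j : Nat) : Int := ((i + j).choose j : Int)

lemma pvRowA_prefix (iN bN : Nat) (prev : List Int)
    (hprev : 1 ≤ iN → ∀ j : Nat, j ≤ bN → prev.getD j 0 = pvG (iN - 1) j) :
    ∀ t : Nat, t ≤ bN + 1 →
      (PySem.List.pyRange 0 (t : Int) 1).foldl
        (fun row j =>
          row ++ [if (iN : Int) * j == 0 then (1 : Int)
                  else PySem.List.pyGetD prev j 0 + PySem.List.pyGetD row (j - 1) 0]) []
        = (List.range t).map (pvG iN) := by
  intro t
  induction t with
  | zero => intro _; simp
  | succ t ih =>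
    intro hle
    have hsplit : PySem.List.pyRange 0 ((t + 1 : Nat) : Int) 1
        = PySem.List.pyRange 0 (t : Int) 1 ++ [(t : Int)] := by
      push_cast
      exact PySem.List.pyRange_one_succ_right (by omega)
    rw [hsplit, List.foldl_append, ih (by omega)]
    rw [List.range_succ, List.map_append, List.map_singleton]
    simp only [List.foldl_cons, List.foldl_nil]
    congr 1
    by_cases hi0 : iN = 0
    · subst hi0
      simp [pvG, Nat.choose_self]
    · by_cases ht0 : t = 0
      · subst ht0
        simp [pvG]
      · have hcond : ((iN : Int) * (t : Int) == 0) = false := by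
          simp only [beq_eq_false_iff_ne, ne_eq, mul_eq_zero]
          omega
        rw [hcond]
        simp only [Bool.false_eq_true, if_false]
        have h1 : PySem.List.pyGetD prev (t : Int) 0 = pvG (iN - 1) t := by
          rw [PySem.List.pyGetD_natCast]
          exact hprev (by omega) t (by omega)
        have ht1 : ((t : Int) - 1) = ((t - 1 : Nat) : Int) := by omega
        have h2 : PySem.List.pyGetD ((List.range t).map (pvG iN)) ((t : Int) - 1) 0
            = pvG iN (t - 1) := by
          rw [ht1, PySem.List.pyGetD_natCast,
              PySem.List.getD_map_range _ _ _ _ (by omega)]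
        rw [h1, h2]
        simp only [List.singleton_inj]
        obtain ⟨i', rfl⟩ : ∃ i', iN = i' + 1 := ⟨iN - 1, by omega⟩
        obtain ⟨t', rfl⟩ : ∃ t', t = t' + 1 := ⟨t - 1, by omega⟩
        simp only [pvG, Nat.add_sub_cancel]
        have hp : (i' + 1 + (t' + 1)).choose (t' + 1)
            = (i' + (t' + 1)).choose (t' + 1) + (i' + 1 + t').choose t' := by
          have hps := Nat.choose_succ_succ (i' + t' + 1) t'
          have e1 : i' + 1 + (t' + 1) = (i' + t' + 1) + 1 := by omega
          have e2 : i' + (t' + 1) = i' + t' + 1 := by omega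
          have e3 : i' + 1 + t' = i' + t' + 1 := by omega
          rw [e1, e2, e3, hps, Nat.add_comm]
        rw [hp]
        push_cast
        ring

lemma pvRowA_eq (iN bN : Nat) (prev : List Int)
    (hprev : 1 ≤ iN → ∀ j : Nat, j ≤ bN → prev.getD j 0 = pvG (iN - 1) j) :
    pvRowA (iN : Int) prev (bN : Int) = (List.range (bN + 1)).map (pvG iN) := by
  unfold pvRowA
  have hc : ((bN : Int) + 1) = ((bN + 1 : Nat) : Int) := by push_cast; ring
  rw [hc]
  exact pvRowA_prefix iN bN prev hprev (bN + 1) (by omega)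

lemma pvDp_prefix (bN : Nat) :
    ∀ t : Nat,
      (PySem.List.pyRange 0 (t : Int) 1).foldl
        (fun dp i => dp ++ [pvRowA i (PySem.List.pyGetD dp (i - 1) []) (bN : Int)]) []
        = (List.range t).map (fun i => (List.range (bN + 1)).map (pvG i)) := by
  intro t
  induction t with
  | zero => simp
  | succ t ih =>
    have hsplit : PySem.List.pyRange 0 ((t + 1 : Nat) : Int) 1
        = PySem.List.pyRange 0 (t : Int) 1 ++ [(t : Int)] := by
      push_cast
      exact PySem.List.pyRange_one_succ_right (by omega)
    rw [hsplit, List.foldl_append, ih]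
    rw [List.range_succ (n := t), List.map_append, List.map_singleton]
    simp only [List.foldl_cons, List.foldl_nil]
    congr 1
    by_cases ht0 : t = 0
    · subst ht0
      have h0 : pvRowA ((0 : Nat) : Int)
          (PySem.List.pyGetD ([] : List (List Int)) (((0 : Nat) : Int) - 1) []) (bN : Int)
          = (List.range (bN + 1)).map (pvG 0) :=
        pvRowA_eq 0 bN _ (by omega)
      simpa using h0
    · have ht1 : ((t : Int) - 1) = ((t - 1 : Nat) : Int) := by omega
      have hget : PySem.List.pyGetD
            ((List.range t).map (fun i => (List.range (bN + 1)).map (pvG i))) ((t : Int) - 1) []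
          = (List.range (bN + 1)).map (pvG (t - 1)) := by
        rw [ht1, PySem.List.pyGetD_natCast, PySem.List.getD_map_range _ _ _ _ (by omega)]
      rw [hget]
      have hrow := pvRowA_eq t bN ((List.range (bN + 1)).map (pvG (t - 1)))
        (fun _ j hj => PySem.List.getD_map_range _ _ _ _ (by omega))
      rw [hrow]

lemma pvA_closed (aN bN : Nat) :
    calculate_recommendations2 (aN : Int) (bN : Int)
      = ((aN + bN).choose bN : Int) * 5 - ((aN : Int) + (bN : Int)) := by
  unfold calculate_recommendations2
  have h1 : ((aN : Int) + 1) = ((aN + 1 : Nat) : Int) := by push_cast; ring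
  rw [h1, pvDp_prefix bN (aN + 1)]
  simp only [PySem.List.pyGetD_natCast]
  rw [PySem.List.getD_map_range _ _ _ _ (by omega),
      PySem.List.getD_map_range _ _ _ _ (by omega)]
  rfl

lemma pvB_loop (d : Nat) :
    ∀ t : Nat,
      (PySem.List.pyRange 1 ((t : Int) + 1) 1).foldl
        (fun res i => PySem.Int.floordiv (res * ((d : Int) + i)) i) 1
        = ((d + t).choose t : Int) := by
  intro t
  induction t with
  | zero => simp
  | succ t ih =>
    have hsplit : PySem.List.pyRange 1 (((t + 1 : Nat) : Int) + 1) 1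
        = PySem.List.pyRange 1 ((t : Int) + 1) 1 ++ [(t : Int) + 1] := by
      push_cast
      exact PySem.List.pyRange_one_succ_right (by omega)
    rw [hsplit, List.foldl_append, ih]
    simp only [List.foldl_cons, List.foldl_nil]
    have hkey : ((d + t).choose t : Int) * ((d : Int) + ((t : Int) + 1))
        = ((d + (t + 1)).choose (t + 1) : Int) * ((t : Int) + 1) := by
      have hN := Nat.add_one_mul_choose_eq (d + t) t
      have hN' : ((d + t + 1) * (d + t).choose t : Int)
          = ((d + (t + 1)).choose (t + 1) : Int) * ((t : Int) + 1) := by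
        rw [show d + (t + 1) = d + t + 1 from by omega]
        exact_mod_cast congrArg (Nat.cast : Nat → Int) hN
      linear_combination hN'
    rw [hkey]
    have hpos : (0 : Int) < (t : Int) + 1 := by positivity
    rw [PySem.Int.floordiv_eq_ediv_of_pos hpos,
        Int.mul_ediv_cancel _ (by omega)]

lemma pvB_closed (aN bN : Nat) :
    calculate_recommendations2_alt (aN : Int) (bN : Int)
      = ((max aN bN + min aN bN).choose (min aN bN) : Int) * 5 - ((aN : Int) + (bN : Int)) := by
  unfold calculate_recommendations2_alt
  have hmin : min (aN : Int) (bN : Int) = ((min aN bN : Nat) : Int) := by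
    push_cast; omega
  have hbody : (fun (res i : Int) => PySem.Int.floordiv (res * ((aN : Int) + (bN : Int) - min (aN : Int) (bN : Int) + i)) i)
      = (fun (res i : Int) => PySem.Int.floordiv (res * (((max aN bN : Nat) : Int) + i)) i) := by
    funext res i
    have hmx : (aN : Int) + (bN : Int) - min (aN : Int) (bN : Int) = ((max aN bN : Nat) : Int) := by
      push_cast; omega
    rw [hmx]
  rw [hbody, hmin, pvB_loop (max aN bN) (min aN bN)]

-- ===== VERDICT (by name: the statement is the Claim_ definition above) =====
theorem calculate_recommendations2_spec : Claim_equal_calculate_recommendations2 := by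
  intro N M _ hpre
  obtain ⟨hN, hM⟩ := hpre
  obtain ⟨aN, rfl⟩ : ∃ a : Nat, N = (a : Int) := ⟨N.toNat, by omega⟩
  obtain ⟨bN, rfl⟩ : ∃ b : Nat, M = (b : Int) := ⟨M.toNat, by omega⟩
  unfold Spec_calculate_recommendations2
  rw [pvA_closed, pvB_closed]
  have hsym : (aN + bN).choose bN = (max aN bN + min aN bN).choose (min aN bN) := by
    rcases le_total aN bN with h | h
    · rw [max_eq_right h, min_eq_left h, Nat.add_comm bN aN]
      have hs := Nat.choose_symm (n := aN + bN) (k := aN) (by omega)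
      rw [show aN + bN - aN = bN from by omega] at hs
      exact hs
    · rw [max_eq_left h, min_eq_right h]
  rw [hsym]
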